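-- pv_equiv track=rewrite | github.com/msdunstan/lcrecho | assembly/app/lcr3/vienna_utils.py | _get_brackets
-- ===== SOURCE A (Python) =====
-- def _get_brackets(seq_lens, bp_x, bp_y):
--     '''_get_brackets'''
--     bp_x = [pos - 1 for pos in bp_x]
--     bp_y = [pos - 1 for pos in bp_y]
--     brackets = []
--     counter = 0
--
--     for seq_len in seq_lens:
--         for pos in range(counter, seq_len + counter):
--             if pos in bp_x:
--                 brackets.append('(')
--             elif pos in bp_y:
--                 brackets.append(')')
--             else:
--                 brackets.append('.')
--         counter += seq_len
--
--     return ''.join(brackets)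
-- ===== SOURCE B (Python) =====
-- def _get_brackets(seq_lens, bp_x, bp_y):
--     '''_get_brackets'''
--     out = []
--     counter = 0
--     for seq_len in seq_lens:
--         seg = ['.'] * (seq_len if seq_len > 0 else 0)
--         for pos in bp_y:
--             i = pos - 1 - counter
--             if 0 <= i < seq_len:
--                 seg[i] = ')'
--         for pos in bp_x:
--             i = pos - 1 - counter
--             if 0 <= i < seq_len:
--                 seg[i] = '('
--         out += seg
--         counter += seq_len
--     return ''.join(out)
-- ===== Notes on version B (the rewrite author's own statement) =====
-- stated objective: faster
-- what changed: Instead of scanning every position and testing membership in the base-pair lists, B fills each segment with '.' and scatter-writes ')' then '(' at the positions listed in bp_y/bp_x (bp_x last so '(' wins on overlap, matching A's if/elif priority), ignoring positions outside the segment.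
import Mathlib
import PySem

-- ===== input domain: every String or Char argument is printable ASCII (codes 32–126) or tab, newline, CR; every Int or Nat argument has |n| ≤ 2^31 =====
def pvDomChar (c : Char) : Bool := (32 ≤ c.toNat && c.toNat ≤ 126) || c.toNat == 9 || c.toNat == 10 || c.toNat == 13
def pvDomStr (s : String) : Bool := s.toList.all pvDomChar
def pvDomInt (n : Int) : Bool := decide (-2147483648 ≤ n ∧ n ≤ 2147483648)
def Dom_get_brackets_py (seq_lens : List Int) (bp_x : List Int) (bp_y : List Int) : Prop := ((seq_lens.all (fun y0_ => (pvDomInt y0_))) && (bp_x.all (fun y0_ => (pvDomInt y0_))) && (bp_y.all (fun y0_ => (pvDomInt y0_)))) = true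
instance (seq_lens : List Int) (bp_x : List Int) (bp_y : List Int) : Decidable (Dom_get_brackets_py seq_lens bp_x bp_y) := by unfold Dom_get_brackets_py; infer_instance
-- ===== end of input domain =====

-- B replaces A's per-position membership scans by a '.'-filled segment buffer that is
-- scatter-written from the pair lists (bp_y first, then bp_x so '(' wins on overlap).

-- ===== PORT A =====
def get_brackets_py (seq_lens : List Int) (bp_x : List Int) (bp_y : List Int) : String :=
  String.ofList (seq_lens.foldl (fun (st : List Char × Int) seq_len =>
    ((PySem.List.pyRange st.2 (seq_len + st.2) 1).foldl
      (fun acc pos =>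
        if (bp_x.map (fun p => p - 1)).contains pos then acc ++ ['(']
        else if (bp_y.map (fun p => p - 1)).contains pos then acc ++ [')']
        else acc ++ ['.']) st.1,
     st.2 + seq_len)) ([], 0)).1

-- ===== PORT B =====
-- one scatter pass: for each pos in lst, write ch at index pos-1-counter when that index is in [0, n)
def gbScatter (ch : Char) (counter n : Int) (lst : List Int) (seg : List Char) : List Char :=
  lst.foldl (fun seg pos =>
    if 0 ≤ pos - 1 - counter ∧ pos - 1 - counter < n then seg.set (pos - 1 - counter).toNat ch
    else seg) seg

def get_brackets_py_alt (seq_lens : List Int) (bp_x : List Int) (bp_y : List Int) : String :=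
  String.ofList (seq_lens.foldl (fun (st : List Char × Int) seq_len =>
    (st.1 ++ gbScatter '(' st.2 seq_len bp_x
       (gbScatter ')' st.2 seq_len bp_y
         (List.replicate (if seq_len > 0 then seq_len else 0).toNat '.')),
     st.2 + seq_len)) ([], 0)).1

-- ===== PRECONDITION & SPEC =====
def Spec_get_brackets_py (seq_lens : List Int) (bp_x : List Int) (bp_y : List Int) (out : String) : Prop := out = get_brackets_py_alt seq_lens bp_x bp_y
instance (seq_lens : List Int) (bp_x : List Int) (bp_y : List Int) (out : String) : Decidable (Spec_get_brackets_py seq_lens bp_x bp_y out) := by unfold Spec_get_brackets_py; infer_instance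

-- ===== CLAIM (what is proved, stated in full; the proofs are below) =====
def Claim_equal_get_brackets_py : Prop := ∀ (seq_lens : List Int) (bp_x : List Int) (bp_y : List Int), Dom_get_brackets_py seq_lens bp_x bp_y → Spec_get_brackets_py seq_lens bp_x bp_y (get_brackets_py seq_lens bp_x bp_y)

-- ===== LEMMAS AND PROOFS =====

-- the character A emits at (0-based) position pos
def gbChar (bp_x bp_y : List Int) (pos : Int) : Char :=
  if (bp_x.map (fun p => p - 1)).contains pos then '('
  else if (bp_y.map (fun p => p - 1)).contains pos then ')'
  else '.'

theorem gbScatter_length (ch : Char) (counter n : Int) (lst : List Int) (seg : List Char) :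
    (gbScatter ch counter n lst seg).length = seg.length := by
  unfold gbScatter
  induction lst generalizing seg with
  | nil => rfl
  | cons p rest ih =>
      simp only [List.foldl_cons]
      rw [ih]
      split <;> simp

theorem gbScatter_getElem? (ch : Char) (counter n : Int) (lst : List Int) (seg : List Char)
    (j : Nat) (hj : j < seg.length) (hjn : (j : Int) < n) :
    (gbScatter ch counter n lst seg)[j]? =
      if lst.contains (counter + j + 1) then some ch else seg[j]? := by
  unfold gbScatter
  induction lst generalizing seg with
  | nil => simp
  | cons p rest ih =>
      simp only [List.foldl_cons]
      by_cases hgd : 0 ≤ p - 1 - counter ∧ p - 1 - counter < n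
      · rw [if_pos hgd]
        rw [ih _ (by simpa using hj)]
        rw [List.getElem?_set]
        by_cases hp : p = counter + (j : Int) + 1
        · have hi : (p - 1 - counter).toNat = j := by omega
          have hbeq : (counter + (j : Int) + 1 == p) = true := by simpa using hp.symm
          simp only [List.contains_cons, hbeq, Bool.true_or, if_true, hi, hj]
          split <;> rfl
        · have hi : (p - 1 - counter).toNat ≠ j := by omega
          have hbeq : (counter + (j : Int) + 1 == p) = false := by
            simpa using fun h => hp h.symm
          rw [if_neg hi]
          simp only [List.contains_cons, hbeq, Bool.false_or]
      · rw [if_neg hgd]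
        rw [ih seg hj]
        have hp : p ≠ counter + (j : Int) + 1 := by
          intro h; apply hgd; constructor <;> omega
        have hbeq : (counter + (j : Int) + 1 == p) = false := by
            simpa using fun h => hp h.symm
        simp only [List.contains_cons, hbeq, Bool.false_or]

theorem gb_mapped_contains (bp : List Int) (pos : Int) :
    (bp.map (fun p => p - 1)).contains pos = bp.contains (pos + 1) := by
  have h : (pos ∈ bp.map (fun p => p - 1)) ↔ (pos + 1 ∈ bp) := by
    simp only [List.mem_map]
    constructor
    · rintro ⟨a, ha, he⟩
      have : a = pos + 1 := by omega
      exact this ▸ ha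
    · intro h
      exact ⟨pos + 1, h, by ring⟩
  simp [h]

-- segment lemma: B's scatter-built segment equals A's membership-scan segment
theorem gb_segment (bp_x bp_y : List Int) (counter n : Int) :
    gbScatter '(' counter n bp_x
      (gbScatter ')' counter n bp_y
        (List.replicate (if n > 0 then n else 0).toNat '.')) =
    (PySem.List.pyRange counter (n + counter) 1).map (gbChar bp_x bp_y) := by
  have hL1 : (gbScatter ')' counter n bp_y
      (List.replicate (if n > 0 then n else 0).toNat '.')).length =
      (if n > 0 then n else 0).toNat := by
    rw [gbScatter_length, List.length_replicate]
  apply List.ext_getElem?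
  intro j
  by_cases hjL : j < (if n > 0 then n else 0).toNat
  · have hjn : (j : Int) < n := by split at hjL <;> omega
    rw [gbScatter_getElem? _ _ _ _ _ j (by rw [hL1]; exact hjL) hjn]
    rw [gbScatter_getElem? _ _ _ _ _ j (by rw [List.length_replicate]; exact hjL) hjn]
    rw [List.getElem?_map]
    have hr : (PySem.List.pyRange counter (n + counter) 1)[j]? = some (counter + j) := by
      rw [PySem.List.getElem?_pyRange_one]
      simp only [if_pos (by omega : j < (n + counter - counter).toNat)]
    rw [hr]
    rw [List.getElem?_replicate]
    simp only [hjL, if_true, Option.map_some]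
    unfold gbChar
    rw [gb_mapped_contains, gb_mapped_contains]
    split_ifs <;> rfl
  · rw [List.getElem?_eq_none, List.getElem?_eq_none]
    · rw [List.length_map, PySem.List.length_pyRange_one]; omega
    · rw [gbScatter_length, hL1]; omega

-- A's inner loop is a map over the range
theorem gb_inner (bp_x bp_y : List Int) (l : List Int) (acc : List Char) :
    l.foldl (fun acc pos =>
        if (bp_x.map (fun p => p - 1)).contains pos then acc ++ ['(']
        else if (bp_y.map (fun p => p - 1)).contains pos then acc ++ [')']
        else acc ++ ['.']) acc = acc ++ l.map (gbChar bp_x bp_y) := by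
  induction l generalizing acc with
  | nil => simp
  | cons p rest ih =>
      simp only [List.foldl_cons, List.map_cons, ih, gbChar]
      split_ifs <;> simp

-- ===== VERDICT (by name: the statement is the Claim_ definition above) =====
theorem get_brackets_py_spec : Claim_equal_get_brackets_py := by
  intro seq_lens bp_x bp_y _
  show get_brackets_py seq_lens bp_x bp_y = get_brackets_py_alt seq_lens bp_x bp_y
  unfold get_brackets_py get_brackets_py_alt
  congr 2
  congr 1
  funext st seq_len
  rw [gb_inner, gb_segment]
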